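-- pv_equiv track=rewrite | github.com/robertonuti60/gpt-assistente- | app.py | guess_ext
-- ===== SOURCE A (Python) =====
-- def guess_ext(name):
--     if not name:
--         return ""
--     name = name.lower()
--     for ext in (".pdf", ".docx", ".txt", ".md", ".csv"):
--         if name.endswith(ext):
--             return ext
--     return ""
-- ===== SOURCE B (Python) =====
-- _EXTS = {".pdf", ".docx", ".txt", ".md", ".csv"}
--
-- def guess_ext(name):
--     if not name:
--         return ""
--     cand = None
--     for c in name.lower():
--         if c == ".":
--             cand = "."
--         elif cand is not None:
--             cand = cand + c
--     if cand is None: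
--         return ""
--     return cand if cand in _EXTS else ""
-- ===== Notes on version B (the rewrite author's own statement) =====
-- stated objective: alternative
-- what changed: Replaces the five repeated endswith suffix scans with a single left-to-right pass that builds the substring after the last dot, followed by one set-membership test.
import Mathlib
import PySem

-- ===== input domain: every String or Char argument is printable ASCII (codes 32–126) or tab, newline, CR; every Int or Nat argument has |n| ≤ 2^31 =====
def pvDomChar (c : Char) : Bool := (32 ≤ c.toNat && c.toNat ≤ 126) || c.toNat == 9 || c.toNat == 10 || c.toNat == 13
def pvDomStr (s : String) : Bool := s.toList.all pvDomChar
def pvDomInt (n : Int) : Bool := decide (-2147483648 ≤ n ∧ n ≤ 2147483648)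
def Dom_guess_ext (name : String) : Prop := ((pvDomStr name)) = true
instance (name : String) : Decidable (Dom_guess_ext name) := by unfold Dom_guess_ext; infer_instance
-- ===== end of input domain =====

-- B replaces A's five endswith suffix scans with one left-to-right pass that builds
-- the substring after the last dot, then a single membership test (objective: alternative).

-- ===== PORT A =====
def guess_ext (name : String) : String :=
  if name = "" then ""
  else
    let n := PySem.Str.lower name
    if PySem.Str.endswith n ".pdf" then ".pdf"
    else if PySem.Str.endswith n ".docx" then ".docx"
    else if PySem.Str.endswith n ".txt" then ".txt"
    else if PySem.Str.endswith n ".md" then ".md"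
    else if PySem.Str.endswith n ".csv" then ".csv"
    else ""

-- ===== PORT B =====
-- one step of Source B's loop: a dot restarts the candidate, other chars extend it
def geStep (cand : Option (List Char)) (c : Char) : Option (List Char) :=
  if c = '.' then some ['.'] else cand.map (· ++ [c])

def geIsExt (e : List Char) : Bool :=
  e = ".pdf".toList ∨ e = ".docx".toList ∨ e = ".txt".toList ∨ e = ".md".toList ∨ e = ".csv".toList

def guess_ext_alt (name : String) : String :=
  if name = "" then ""
  else
    match (PySem.Str.lower name).toList.foldl geStep none with
    | none => ""
    | some cand => if geIsExt cand then String.ofList cand else ""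

-- ===== PRECONDITION & SPEC =====
def Spec_guess_ext (name : String) (out : String) : Prop := out = guess_ext_alt name
instance (name : String) (out : String) : Decidable (Spec_guess_ext name out) := by unfold Spec_guess_ext; infer_instance

-- ===== CLAIM (what is proved, stated in full; the proofs are below) =====
def Claim_equal_guess_ext : Prop := ∀ (name : String), Dom_guess_ext name → Spec_guess_ext name (guess_ext name)

-- ===== LEMMAS AND PROOFS =====

-- a dot-free tail only extends the candidate
theorem geStep_dotfree (rest : List Char) : ∀ (p : List Char), '.' ∉ rest →
    List.foldl geStep (some p) rest = some (p ++ rest) := by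
  induction rest with
  | nil => intro p _; simp
  | cons c rest ih =>
    intro p h
    have hc : c ≠ '.' := fun hc => h (hc ▸ List.mem_cons_self)
    have hr : '.' ∉ rest := fun hr => h (List.mem_cons_of_mem _ hr)
    simp [List.foldl, geStep, hc, ih (p ++ [c]) hr]

-- if the string ends with '.'::rest (rest dot-free), the scan yields exactly that suffix
theorem geStep_suffix (s rest : List Char) (a : Option (List Char)) (h : '.' ∉ rest) :
    List.foldl geStep a (s ++ '.' :: rest) = some ('.' :: rest) := by
  rw [List.foldl_append]
  simp only [List.foldl, geStep]
  simpa using geStep_dotfree rest ['.'] h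

-- invariant: a produced candidate is a suffix of the scanned text (when started from none)
theorem geStep_inv (t : List Char) : ∀ (a : Option (List Char)) (e : List Char),
    List.foldl geStep a t = some e →
    e <:+ t ∨ ∃ p, a = some p ∧ e = p ++ t := by
  induction t with
  | nil => intro a e h; right; exact ⟨e, by simpa using h, by simp⟩
  | cons c t ih =>
    intro a e h
    by_cases hc : c = '.'
    · subst hc
      simp only [List.foldl, geStep] at h
      rcases ih _ _ h with hs | ⟨p, hp, he⟩
      · exact Or.inl (hs.trans (List.suffix_cons _ _))
      · left
        cases hp
        simp [he]
    · simp only [List.foldl, geStep, if_neg hc] at h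
      rcases ih _ _ h with hs | ⟨p, hp, he⟩
      · exact Or.inl (hs.trans (List.suffix_cons _ _))
      · cases a with
        | none => simp at hp
        | some q =>
          right
          refine ⟨q, rfl, ?_⟩
          simp only [Option.map_some, Option.some.injEq] at hp
          simp [he, ← hp]

theorem geStep_none_suffix (t e : List Char) (h : List.foldl geStep none t = some e) :
    e <:+ t := by
  rcases geStep_inv t none e h with hs | ⟨p, hp, _⟩
  · exact hs
  · simp at hp

-- endswith ext (ext = '.'::rest, rest dot-free) forces the scan's result
theorem scan_of_endswith (t rest : List Char) (h : '.' ∉ rest)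
    (he : ('.' :: rest) <:+ t) :
    List.foldl geStep none t = some ('.' :: rest) := by
  rcases he with ⟨s, hs⟩
  rw [← hs]
  exact geStep_suffix s rest none h

theorem guess_ext_spec_aux (name : String) : guess_ext name = guess_ext_alt name := by
  unfold guess_ext guess_ext_alt
  by_cases h0 : name = ""
  · simp [h0]
  simp only [if_neg h0, PySem.Str.endswith_eq, PySem.Str.toList_lower]
  set t := PySem.Chars.lower name.toList with ht
  have hend : ∀ (ext : List Char), PySem.Chars.endswith t ext = true ↔ ext <:+ t :=
    fun ext => PySem.Chars.endswith_iff _ _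
  by_cases h1 : PySem.Chars.endswith t ['.', 'p', 'd', 'f'] = true
  · rw [scan_of_endswith t "pdf".toList (by decide) (by simpa using (hend _).1 h1)]
    simp [h1, geIsExt]
  by_cases h2 : PySem.Chars.endswith t ['.', 'd', 'o', 'c', 'x'] = true
  · rw [scan_of_endswith t "docx".toList (by decide) (by simpa using (hend _).1 h2)]
    simp [h1, h2, geIsExt]
  by_cases h3 : PySem.Chars.endswith t ['.', 't', 'x', 't'] = true
  · rw [scan_of_endswith t "txt".toList (by decide) (by simpa using (hend _).1 h3)]
    simp [h1, h2, h3, geIsExt]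
  by_cases h4 : PySem.Chars.endswith t ['.', 'm', 'd'] = true
  · rw [scan_of_endswith t "md".toList (by decide) (by simpa using (hend _).1 h4)]
    simp [h1, h2, h3, h4, geIsExt]
  by_cases h5 : PySem.Chars.endswith t ['.', 'c', 's', 'v'] = true
  · rw [scan_of_endswith t "csv".toList (by decide) (by simpa using (hend _).1 h5)]
    simp [h1, h2, h3, h4, h5, geIsExt]
  · cases hf : List.foldl geStep none t with
    | none => simp [h1, h2, h3, h4, h5]
    | some e =>
      have hsuf := geStep_none_suffix t e hf
      have hne : geIsExt e = false := by
        simp only [geIsExt, decide_eq_false_iff_not]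
        push Not
        refine ⟨?_, ?_, ?_, ?_, ?_⟩ <;> rintro rfl
        · exact h1 ((hend _).2 hsuf)
        · exact h2 ((hend _).2 hsuf)
        · exact h3 ((hend _).2 hsuf)
        · exact h4 ((hend _).2 hsuf)
        · exact h5 ((hend _).2 hsuf)
      simp [h1, h2, h3, h4, h5, hne]

-- ===== VERDICT (by name: the statement is the Claim_ definition above) =====
theorem guess_ext_spec : Claim_equal_guess_ext := by
  intro name _
  exact guess_ext_spec_aux name
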